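-- pv_equiv track=rewrite | github.com/Wakcedon/jarvis | jarvis/wakeword_vosk.py | _contains_token_sequence
-- ===== SOURCE A (Python) =====
-- def _contains_token_sequence(tokens: tuple[str, ...], phrase_tokens: tuple[str, ...]) -> bool:
--     if not phrase_tokens:
--         return False
--     if not tokens:
--         return False
--     if len(phrase_tokens) > len(tokens):
--         return False
--     if tokens == phrase_tokens:
--         return True
--     # contiguous subsequence match
--     n = len(phrase_tokens)
--     for i in range(0, len(tokens) - n + 1):
--         if tokens[i : i + n] == phrase_tokens:
--             return True
--     return False
-- ===== SOURCE B (Python) =====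
-- def _contains_token_sequence(tokens: tuple[str, ...], phrase_tokens: tuple[str, ...]) -> bool:
--     # One left-to-right pass: maintain the set of phrase-prefix lengths matched
--     # so far (NFA simulation) instead of re-comparing a slice at every start index.
--     if not phrase_tokens:
--         return False
--     n = len(phrase_tokens)
--     active = []  # lengths l (0 < l < n) s.t. phrase_tokens[:l] is a suffix of the tokens seen
--     for tok in tokens:
--         nxt = [l + 1 for l in active if phrase_tokens[l] == tok]
--         if phrase_tokens[0] == tok:
--             nxt.append(1)
--         if n in nxt:
--             return True
--         active = nxt
--     return False
-- ===== Notes on version B (the rewrite author's own statement) =====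
-- stated objective: alternative
-- what changed: Replaced the start-index loop that compares a fresh slice tokens[i:i+n] at every position by a single left-to-right pass that maintains the set of phrase-prefix lengths currently matched (NFA simulation), so each token is read once and no slices are built.
import Mathlib
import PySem

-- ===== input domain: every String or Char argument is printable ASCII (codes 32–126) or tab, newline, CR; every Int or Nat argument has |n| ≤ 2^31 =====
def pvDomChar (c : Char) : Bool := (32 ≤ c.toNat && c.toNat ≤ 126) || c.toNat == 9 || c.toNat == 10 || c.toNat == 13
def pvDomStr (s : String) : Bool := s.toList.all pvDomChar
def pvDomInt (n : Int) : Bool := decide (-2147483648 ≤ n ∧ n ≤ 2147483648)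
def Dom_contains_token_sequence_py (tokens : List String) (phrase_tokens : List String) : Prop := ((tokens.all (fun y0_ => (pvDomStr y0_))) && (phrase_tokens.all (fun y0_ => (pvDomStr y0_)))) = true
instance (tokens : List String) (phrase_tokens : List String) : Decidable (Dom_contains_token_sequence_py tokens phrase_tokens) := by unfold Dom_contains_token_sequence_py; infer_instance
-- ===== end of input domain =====

-- B replaces A's start-index slice scan by a single left-to-right pass maintaining
-- the set of phrase-prefix lengths currently matched (alternative algorithm, same worst-case cost).


-- ===== PORT A =====
def contains_token_sequence_py (tokens : List String) (phrase_tokens : List String) : Bool :=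
  if phrase_tokens.isEmpty then false
  else if tokens.isEmpty then false
  else if phrase_tokens.length > tokens.length then false
  else if tokens == phrase_tokens then true
  else
    -- for i in range(0, len(tokens) - n + 1): if tokens[i:i+n] == phrase_tokens: return True
    (PySem.List.pyRange 0 ((tokens.length : Int) - (phrase_tokens.length : Int) + 1) 1).any
      (fun i => PySem.List.slice tokens (some i) (some (i + (phrase_tokens.length : Int))) == phrase_tokens)

-- ===== PORT B =====
-- nxt = [l + 1 for l in active if phrase_tokens[l] == tok], then append 1 if phrase_tokens[0] == tok
-- (every l ∈ active satisfies l < phrase_tokens.length, so getD is exactly Python's indexing here)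
def pvAltStep (p : List String) (active : List Nat) (tok : String) : List Nat :=
  ((active.filter (fun l => p.getD l "" == tok)).map (fun l => l + 1)) ++
    (if p.getD 0 "" == tok then [1] else [])

def pvAltGo (p : List String) (n : Nat) : List Nat → List String → Bool
  | _, [] => false
  | active, tok :: rest =>
      let nxt := pvAltStep p active tok
      if nxt.contains n then true else pvAltGo p n nxt rest

def contains_token_sequence_py_alt (tokens : List String) (phrase_tokens : List String) : Bool :=
  if phrase_tokens.isEmpty then false
  else pvAltGo phrase_tokens phrase_tokens.length [] tokens

-- ===== PRECONDITION & SPEC =====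
def Spec_contains_token_sequence_py (tokens : List String) (phrase_tokens : List String) (out : Bool) : Prop := out = contains_token_sequence_py_alt tokens phrase_tokens
instance (tokens : List String) (phrase_tokens : List String) (out : Bool) : Decidable (Spec_contains_token_sequence_py tokens phrase_tokens out) := by unfold Spec_contains_token_sequence_py; infer_instance

-- ===== CLAIM (what is proved, stated in full; the proofs are below) =====
def Claim_equal_contains_token_sequence_py : Prop := ∀ (tokens : List String) (phrase_tokens : List String), Dom_contains_token_sequence_py tokens phrase_tokens → Spec_contains_token_sequence_py tokens phrase_tokens (contains_token_sequence_py tokens phrase_tokens)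

-- ===== LEMMAS AND PROOFS =====

-- A returns true exactly when phrase_tokens is a nonempty contiguous subsequence of tokens.
theorem pvA_char (tokens p : List String) :
    contains_token_sequence_py tokens p = true ↔ (p ≠ [] ∧ p <:+: tokens) := by
  unfold contains_token_sequence_py
  split_ifs with h1 h2 h3 h4
  · simp_all
  · simp only [List.isEmpty_iff] at h2; subst h2
    simp [List.infix_nil]
  · constructor
    · simp
    · rintro ⟨hp, hinf⟩; exact absurd hinf.length_le (by omega)
  · simp only [beq_iff_eq] at h4; subst h4
    simp [List.isEmpty_iff] at h1
    simp [h1]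
  · push Not at h3
    simp only [List.isEmpty_iff] at h1
    rw [PySem.List.pyRange_one]
    simp only [List.any_map, List.any_eq_true, List.mem_range, Function.comp, zero_add, beq_iff_eq]
    have htn : (((tokens.length : Int) - (p.length : Int) + 1 - 0)).toNat = tokens.length - p.length + 1 := by omega
    rw [htn]
    constructor
    · rintro ⟨j, hj, hsl⟩
      refine ⟨h1, ?_⟩
      rw [show ((j:Int) + (p.length:Int)) = ((j:Nat):Int) + ((p.length:Nat):Int) from rfl,
        PySem.List.slice_natCast_add] at hsl
      have key : tokens = tokens.take j ++ ((tokens.drop j).take p.length ++ (tokens.drop j).drop p.length) := by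
        rw [List.take_append_drop, List.take_append_drop]
      rw [hsl] at key
      exact ⟨tokens.take j, (tokens.drop j).drop p.length, by rw [List.append_assoc]; exact key.symm⟩
    · rintro ⟨hp, s, t, rfl⟩
      refine ⟨s.length, by simp; omega, ?_⟩
      rw [show ((s.length:Int) + (p.length:Int)) = ((s.length:Nat):Int) + ((p.length:Nat):Int) from rfl,
        PySem.List.slice_natCast_add]
      rw [List.append_assoc, List.drop_left, List.take_left]

-- (xs ++ [a]) is a suffix of (ys ++ [b]) iff xs is a suffix of ys and a = b.
theorem pvSuffix_concat {α : Type} (xs ys : List α) (a b : α) :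
    (xs ++ [a]) <:+ (ys ++ [b]) ↔ xs <:+ ys ∧ a = b := by
  rw [← List.reverse_prefix]
  simp [List.cons_prefix_cons, and_comm]

-- take (m+1) decomposition at a valid index
theorem pvTake_succ (p : List String) (m : Nat) (hm : m < p.length) :
    p.take (m + 1) = p.take m ++ [p.getD m ""] := by
  rw [List.take_add_one, List.getElem?_eq_getElem hm]
  simp [List.getD, List.getElem?_eq_getElem hm]

-- one step of B preserves/advances the active-prefix invariant
theorem pvStep_mem (p : List String) (seen : List String) (active : List Nat) (tok : String)
    (hp : p ≠ [])
    (hinv : ∀ l, l ∈ active ↔ (0 < l ∧ l < p.length ∧ p.take l <:+ seen)) :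
    ∀ l, l ∈ pvAltStep p active tok ↔ (0 < l ∧ l ≤ p.length ∧ p.take l <:+ seen ++ [tok]) := by
  intro l
  have hn : 0 < p.length := List.length_pos_iff.mpr hp
  simp only [pvAltStep, List.mem_append, List.mem_map, List.mem_filter, beq_iff_eq]
  constructor
  · rintro (⟨l', ⟨hl'a, hl'tok⟩, rfl⟩ | hone)
    · obtain ⟨hl'0, hl'n, hsuf⟩ := (hinv l').mp hl'a
      refine ⟨by omega, by omega, ?_⟩
      rw [pvTake_succ p l' hl'n, pvSuffix_concat]
      exact ⟨hsuf, hl'tok⟩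
    · by_cases h0 : p.getD 0 "" = tok
      · rw [if_pos h0] at hone
        obtain rfl : l = 1 := by simpa using hone
        refine ⟨one_pos, hn, ?_⟩
        rw [pvTake_succ p 0 hn, h0]
        exact ⟨seen, by simp⟩
      · rw [if_neg h0] at hone; simp at hone
  · rintro ⟨hl0, hln, hsuf⟩
    obtain ⟨m, rfl⟩ : ∃ m, l = m + 1 := ⟨l - 1, by omega⟩
    have hmn : m < p.length := by omega
    rw [pvTake_succ p m hmn, pvSuffix_concat] at hsuf
    obtain ⟨hsuf', htok⟩ := hsuf
    rcases Nat.eq_zero_or_pos m with rfl | hm0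
    · right; rw [if_pos htok]; simp
    · left
      exact ⟨m, ⟨(hinv m).mpr ⟨hm0, hmn, hsuf'⟩, htok⟩, rfl⟩

-- B's loop finds exactly the occurrences of p ending inside the remaining tokens ts
theorem pvGo_char (p : List String) (hp : p ≠ []) :
    ∀ (ts seen : List String) (active : List Nat),
    (∀ l, l ∈ active ↔ (0 < l ∧ l < p.length ∧ p.take l <:+ seen)) →
    (pvAltGo p p.length active ts = true ↔ ∃ u v, ts = u ++ v ∧ u ≠ [] ∧ p <:+ seen ++ u) := by
  have hn : 0 < p.length := List.length_pos_iff.mpr hp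
  intro ts
  induction ts with
  | nil =>
    intro seen active _
    simp only [pvAltGo, Bool.false_eq_true, false_iff]
    rintro ⟨u, v, huv, hu, -⟩
    exact hu (List.append_eq_nil_iff.mp huv.symm).1
  | cons tok rest ih =>
    intro seen active hinv
    have hstep := pvStep_mem p seen active tok hp hinv
    show (if (pvAltStep p active tok).contains p.length then true
          else pvAltGo p p.length (pvAltStep p active tok) rest) = true ↔ _
    by_cases hc : (pvAltStep p active tok).contains p.length
    · rw [if_pos hc]
      have hmem : p.length ∈ pvAltStep p active tok := by simpa using hc
      obtain ⟨-, -, hsuf⟩ := (hstep p.length).mp hmem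
      rw [List.take_length] at hsuf
      simp only [true_iff]
      exact ⟨[tok], rest, rfl, by simp, by simpa using hsuf⟩
    · rw [if_neg hc]
      have hninv : ∀ l, l ∈ pvAltStep p active tok ↔
          (0 < l ∧ l < p.length ∧ p.take l <:+ (seen ++ [tok])) := by
        intro l
        rw [hstep l]
        constructor
        · rintro ⟨h1, h2, h3⟩
          refine ⟨h1, ?_, h3⟩
          rcases Nat.lt_or_ge l p.length with h | h
          · exact h
          · exfalso
            obtain rfl : l = p.length := by omega
            exact hc (by simpa using (hstep p.length).mpr ⟨h1, h2, h3⟩)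
        · rintro ⟨h1, h2, h3⟩; exact ⟨h1, by omega, h3⟩
      rw [ih (seen ++ [tok]) _ hninv]
      constructor
      · rintro ⟨u', v', rfl, hu', hsuf⟩
        exact ⟨tok :: u', v', rfl, by simp, by simpa [List.append_assoc] using hsuf⟩
      · rintro ⟨u, v, huv, hu, hsuf⟩
        rcases u with _ | ⟨a, u''⟩
        · exact absurd rfl hu
        · rw [List.cons_append] at huv
          injection huv with hta hrest
          subst hta
          rcases u'' with _ | ⟨b, u3⟩
          · exfalso
            apply hc
            have hpm : p.length ∈ pvAltStep p active tok := by
              apply (hstep p.length).mpr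
              refine ⟨hn, le_refl _, ?_⟩
              rw [List.take_length]
              simpa using hsuf
            simpa using hpm
          · refine ⟨b :: u3, v, hrest, by simp, ?_⟩
            simpa [List.append_assoc] using hsuf

-- B returns true exactly when phrase_tokens is a nonempty contiguous subsequence of tokens.
theorem pvB_char (tokens p : List String) :
    contains_token_sequence_py_alt tokens p = true ↔ (p ≠ [] ∧ p <:+: tokens) := by
  unfold contains_token_sequence_py_alt
  split_ifs with h1
  · simp_all
  · simp only [List.isEmpty_iff] at h1
    have hinv0 : ∀ l, l ∈ ([] : List Nat) ↔ (0 < l ∧ l < p.length ∧ p.take l <:+ ([] : List String)) := by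
      intro l
      simp only [List.not_mem_nil, false_iff]
      rintro ⟨hl0, hln, hsuf⟩
      rcases List.take_eq_nil_iff.mp (List.suffix_nil.mp hsuf) with h | h
      · omega
      · exact h1 h
    rw [pvGo_char p h1 tokens [] [] hinv0]
    constructor
    · rintro ⟨u, v, rfl, hu, hsuf⟩
      obtain ⟨w, hw⟩ := hsuf
      simp only [List.nil_append] at hw
      exact ⟨h1, w, v, by rw [hw]⟩
    · rintro ⟨-, s, t, rfl⟩
      refine ⟨s ++ p, t, by simp, by simp [h1], ?_⟩
      simp [List.suffix_append]

-- ===== VERDICT (by name: the statement is the Claim_ definition above) =====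
theorem contains_token_sequence_py_spec : Claim_equal_contains_token_sequence_py := by
  intro tokens p _
  show contains_token_sequence_py tokens p = contains_token_sequence_py_alt tokens p
  rw [Bool.eq_iff_iff, pvA_char, pvB_char]
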